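-- pv_equiv track=rewrite | github.com/mrvgao/ChineseWordSegment | summary/text_summary.py | change_text_english
-- ===== SOURCE A (Python) =====
-- def is_space(char):
--     if char == ' ':
--         return True
--     else:
--         return False
--
-- def forward_is_english(index, text):
--     while index < len(text):
--         if is_space(text[index]):
--             index += 1
--             continue
--         elif text[index].isalpha():
--             return True
--         else:
--             return False
--
-- def change_text_english(text):
--     if len(text) <= 1:
--         return text
--
--     new_text = text[0]
--     placeholder = u'\U0001f604'
--     for i in range(1, len(text)-1):
--         current_char = text[i]
--         if (is_space(current_char) and forward_is_english(i, text)) or (is_space(current_char) and text[i-1].isalpha()):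
--             new_text += placeholder
--         else:
--             new_text += current_char
--
--     new_text += text[-1]
--
--     return new_text
-- ===== SOURCE B (Python) =====
-- def change_text_english(text):
--     if len(text) <= 1:
--         return text
--     # next_alpha[i]: the first non-space character at position >= i exists and is alphabetic
--     next_alpha = []
--     carry = False
--     for c in reversed(text):
--         if c != ' ':
--             carry = c.isalpha()
--         next_alpha.append(carry)
--     next_alpha.reverse()
--     out = [text[0]]
--     for prev, cur, na in zip(text, text[1:-1], next_alpha[1:]):
--         out.append('\U0001f604' if cur == ' ' and (na or prev.isalpha()) else cur)
--     out.append(text[-1])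
--     return ''.join(out)
-- ===== Notes on version B (the rewrite author's own statement) =====
-- stated objective: alternative
-- what changed: B replaces A's per-space forward rescan (forward_is_english scans ahead from every space) and character-by-character string concatenation by one backward pass that precomputes a next-non-space-is-alpha flag per position, then builds the result in a single zip pass joined at the end.
import Mathlib
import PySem

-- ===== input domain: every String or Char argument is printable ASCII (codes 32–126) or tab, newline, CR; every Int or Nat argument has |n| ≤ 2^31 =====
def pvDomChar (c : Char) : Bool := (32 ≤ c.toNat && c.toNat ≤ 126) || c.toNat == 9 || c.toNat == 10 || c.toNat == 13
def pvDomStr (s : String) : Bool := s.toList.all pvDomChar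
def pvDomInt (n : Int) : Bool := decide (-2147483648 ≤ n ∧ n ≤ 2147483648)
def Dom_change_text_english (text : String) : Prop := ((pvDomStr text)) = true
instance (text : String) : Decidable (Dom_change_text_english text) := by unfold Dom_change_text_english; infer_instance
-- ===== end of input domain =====

-- B replaces A's per-space forward rescan (forward_is_english) by one backward pass precomputing,
-- for every position, whether the next non-space character is alphabetic, then a single zip pass
-- (objective: alternative single-pass algorithm; no speed claim).

-- ===== PORT A =====
-- is_space(char) inlined as (c == ' '); forward_is_english(index, text) scans text[index:],
-- so it is ported as a recursion on the suffix list (the while loop's 'index += 1' = dropping the head).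
-- Its Python falls off the loop returning None (falsy) when the suffix is all spaces: ported as false,
-- exact in the boolean context it is used in.
def forwardIsEnglish : List Char → Bool
  | [] => false
  | c :: rest => if c == ' ' then forwardIsEnglish rest else PySem.Chars.isalpha c

def change_text_english (text : String) : String :=
  let cs := text.toList
  if cs.length ≤ 1 then text
  else
    -- new_text = text[0]; for i in range(1, len(text)-1): … new_text += …
    let body := (PySem.List.pyRange 1 ((cs.length : Int) - 1) 1).foldl
      (fun acc i =>
        let currentChar := PySem.List.pyGetD cs i ' '
        if (currentChar == ' ' && forwardIsEnglish (cs.drop i.toNat))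
            || (currentChar == ' ' && PySem.Chars.isalpha (PySem.List.pyGetD cs (i - 1) ' ')) then
          acc ++ [Char.ofNat 0x1F604]
        else
          acc ++ [currentChar])
      [cs.headD ' ']
    -- new_text += text[-1]
    String.ofList (body ++ [cs.getLastD ' '])

-- ===== PORT B =====
def change_text_english_alt (text : String) : String :=
  let cs := text.toList
  if cs.length ≤ 1 then text
  else
    -- backward pass: for c in reversed(text): if c != ' ': carry = c.isalpha(); next_alpha.append(carry)
    -- then next_alpha.reverse()
    let na := ((cs.reverse.foldl
      (fun (st : List Bool × Bool) c =>
        let carry := if c != ' ' then PySem.Chars.isalpha c else st.2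
        (st.1 ++ [carry], carry))
      ([], false)).1).reverse
    -- for prev, cur, na in zip(text, text[1:-1], next_alpha[1:])   (text[1:-1] = drop 1 then dropLast)
    let body := (cs.zip (((cs.drop 1).dropLast).zip (na.drop 1))).map
      (fun pcn =>
        if pcn.2.1 == ' ' && (pcn.2.2 || PySem.Chars.isalpha pcn.1) then Char.ofNat 0x1F604
        else pcn.2.1)
    String.ofList ((cs.headD ' ' :: body) ++ [cs.getLastD ' '])

-- ===== PRECONDITION & SPEC =====
def Spec_change_text_english (text : String) (out : String) : Prop := out = change_text_english_alt text
instance (text : String) (out : String) : Decidable (Spec_change_text_english text out) := by unfold Spec_change_text_english; infer_instance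

-- ===== CLAIM (what is proved, stated in full; the proofs are below) =====
def Claim_equal_change_text_english : Prop := ∀ (text : String), Dom_change_text_english text → Spec_change_text_english text (change_text_english text)

-- ===== LEMMAS AND PROOFS =====

-- the intended value of B's next_alpha list: forwardIsEnglish of every suffix
def sFlags : List Char → List Bool
  | [] => []
  | c :: rest => forwardIsEnglish (c :: rest) :: sFlags rest

theorem sFlags_length (cs : List Char) : (sFlags cs).length = cs.length := by
  induction cs with
  | nil => rfl
  | cons c rest ih => simp [sFlags, ih]

theorem sFlags_getElem (cs : List Char) (i : Nat) (h : i < cs.length)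
    (h' : i < (sFlags cs).length) : (sFlags cs)[i] = forwardIsEnglish (cs.drop i) := by
  induction cs generalizing i with
  | nil => simp at h
  | cons c rest ih =>
    cases i with
    | zero => simp [sFlags]
    | succ j =>
      simp only [sFlags, List.getElem_cons_succ, List.drop_succ_cons]
      exact ih j (by simpa using h) (by simpa [sFlags_length] using h)

-- B's backward fold computes sFlags
theorem na_foldr_eq (cs : List Char) :
    cs.foldr (fun c (st : List Bool × Bool) =>
        let carry := if c != ' ' then PySem.Chars.isalpha c else st.2
        (st.1 ++ [carry], carry)) ([], false)
      = ((sFlags cs).reverse, forwardIsEnglish cs) := by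
  induction cs with
  | nil => rfl
  | cons c rest ih =>
    simp only [List.foldr_cons, ih, sFlags, List.reverse_cons, forwardIsEnglish]
    by_cases hc : c = ' '
    · simp [hc]
    · simp [hc]

theorem na_eq (cs : List Char) :
    ((cs.reverse.foldl
      (fun (st : List Bool × Bool) c =>
        let carry := if c != ' ' then PySem.Chars.isalpha c else st.2
        (st.1 ++ [carry], carry))
      ([], false)).1).reverse = sFlags cs := by
  rw [List.foldl_reverse]
  have := na_foldr_eq cs
  simp only [this]
  simp

-- ===== VERDICT (by name: the statement is the Claim_ definition above) =====
theorem map_bodies_eq (cs : List Char) (h2 : 2 ≤ cs.length) :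
    (PySem.List.pyRange 1 ((cs.length : Int) - 1) 1).map
      (fun i =>
        if (PySem.List.pyGetD cs i ' ' == ' ' && forwardIsEnglish (cs.drop i.toNat))
            || (PySem.List.pyGetD cs i ' ' == ' '
                && PySem.Chars.isalpha (PySem.List.pyGetD cs (i - 1) ' ')) then
          Char.ofNat 0x1F604
        else PySem.List.pyGetD cs i ' ')
    = (cs.zip (((cs.drop 1).dropLast).zip ((sFlags cs).drop 1))).map
      (fun pcn =>
        if pcn.2.1 == ' ' && (pcn.2.2 || PySem.Chars.isalpha pcn.1) then Char.ofNat 0x1F604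
        else pcn.2.1) := by
  apply List.ext_getElem
  · simp [PySem.List.length_pyRange_one, List.length_dropLast, sFlags_length]
    omega
  · intro k hk1 hk2
    have hklt : k < cs.length - 2 := by
      simpa [PySem.List.length_pyRange_one] using hk1
    have hk1n : 1 + k < cs.length := by omega
    have hcast : (1 : Int) + (k : Int) = ((1 + k : Nat) : Int) := by omega
    have hget : PySem.List.pyGetD cs ((1 : Int) + (k : Int)) ' ' = cs[1 + k]'hk1n := by
      rw [hcast, PySem.List.pyGetD_natCast]
      simp [List.getD_eq_getElem?_getD, hk1n]
    have hgetp : PySem.List.pyGetD cs ((1 : Int) + (k : Int) - 1) ' '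
        = cs[k]'(by omega) := by
      have : (1 : Int) + (k : Int) - 1 = ((k : Nat) : Int) := by omega
      rw [this, PySem.List.pyGetD_natCast]
      simp [List.getD_eq_getElem?_getD, (by omega : k < cs.length)]
    have htoNat : ((1 : Int) + (k : Int)).toNat = 1 + k := by omega
    simp only [List.getElem_map, PySem.List.getElem_pyRange_one, hget, hgetp, htoNat,
      List.getElem_zip,
      List.getElem_dropLast, List.getElem_drop,
      sFlags_getElem cs (1 + k) hk1n (by simp [sFlags_length]; omega)]
    by_cases hc : cs[1 + k]'hk1n == ' '
    · simp only [hc]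
      cases forwardIsEnglish (cs.drop (1 + k)) <;>
        cases PySem.Chars.isalpha (cs[k]'(by omega)) <;> rfl
    · simp only [hc]
      rfl

theorem change_text_english_spec : Claim_equal_change_text_english := by
  intro text _
  unfold Spec_change_text_english change_text_english change_text_english_alt
  by_cases h : text.toList.length ≤ 1
  · simp only [if_pos h]
  · simp only [if_neg h, na_eq]
    rw [show (fun (acc : List Char) (i : Int) =>
          let currentChar := PySem.List.pyGetD text.toList i ' '
          if (currentChar == ' ' && forwardIsEnglish (text.toList.drop i.toNat))
              || (currentChar == ' '
                  && PySem.Chars.isalpha (PySem.List.pyGetD text.toList (i - 1) ' ')) then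
            acc ++ [Char.ofNat 0x1F604]
          else acc ++ [currentChar])
        = (fun acc i => acc ++
            [if (PySem.List.pyGetD text.toList i ' ' == ' '
                  && forwardIsEnglish (text.toList.drop i.toNat))
                || (PySem.List.pyGetD text.toList i ' ' == ' '
                    && PySem.Chars.isalpha (PySem.List.pyGetD text.toList (i - 1) ' ')) then
              Char.ofNat 0x1F604
            else PySem.List.pyGetD text.toList i ' ']) from by
        funext acc i; dsimp only []; split <;> rfl]
    rw [PySem.List.foldl_append_singleton_eq_map]
    rw [map_bodies_eq text.toList (by omega)]
    simp
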